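-- pv_equiv track=rewrite | github.com/diegoccrs/ProyectoAlgoritmos-Diego-Caceres | GestionVentaEntradas.py | es_ondulado
-- ===== SOURCE A (Python) =====
-- def es_ondulado(cedula):
--     '''
--     Verifica si el número de cédula es ondulado
--
--     :param cedula: número de cédula
--
--     :return: True si el número es ondulado, False si no lo es
--     '''
--
--     # convierte el número en una lista de dígitos y verifica si hay exactamente dos dígitos distintos en el número. Si no, retorna False
--     digitos = [int(d) for d in str(cedula)]
--
--     if len(set(digitos)) != 2:
--         return False
--
--     # recorre la lista de dígitos y verifica si los dígitos se alternan correctamente. Si no, retorna False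
--     for i in range(len(digitos)-2):
--         if digitos[i] == digitos[i + 2]:
--             continue
--         else:
--             return False
--
--     # si se cumplen todas las condiciones, retorna True
--     return True
-- ===== SOURCE B (Python) =====
-- def es_ondulado(cedula):
--     # Arithmetic version: peel digits from the right, no string/set construction.
--     if cedula < 10:
--         return False
--     a = cedula % 10
--     b = cedula // 10 % 10
--     if a == b:
--         return False
--     n = cedula // 100
--     while n > 0:
--         if n % 10 != a:
--             return False
--         a, b = b, a
--         n //= 10
--     return True
-- ===== Notes on version B (the rewrite author's own statement) =====
-- stated objective: alternative
-- what changed: Replaces A's string/set pipeline (digit list from str(cedula), set-cardinality guard, index loop comparing digitos[i] with digitos[i+2]) by pure arithmetic: peel the two lowest digits with % and //, reject if they coincide, then a single divmod loop checks every further digit continues the two-digit alternation; no string, list or set is built.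
import Mathlib
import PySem

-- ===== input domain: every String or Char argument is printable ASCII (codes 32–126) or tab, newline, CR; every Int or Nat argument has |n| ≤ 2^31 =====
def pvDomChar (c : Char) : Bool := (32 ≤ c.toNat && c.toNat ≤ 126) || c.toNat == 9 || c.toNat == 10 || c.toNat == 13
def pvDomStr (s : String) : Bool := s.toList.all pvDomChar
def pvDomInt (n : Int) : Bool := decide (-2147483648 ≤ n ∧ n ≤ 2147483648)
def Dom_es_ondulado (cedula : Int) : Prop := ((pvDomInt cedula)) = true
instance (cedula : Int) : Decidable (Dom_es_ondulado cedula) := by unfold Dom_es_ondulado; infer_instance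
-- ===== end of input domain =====

-- B replaces A's string/set pipeline (digit list from str, set-cardinality guard, index scan
-- digitos[i] == digitos[i+2]) by pure arithmetic: peel digits with % and //, reject equal last
-- two digits, then one divmod loop checks the alternation (objective: alternative).

-- ===== PORT A =====
-- digitos = [int(d) for d in str(cedula)]; the '.getD 0' in int(d) is unreachable under
-- Pre_ (cedula ≥ 0, so every character of str(cedula) is a digit); for cedula < 0 Python
-- raises ValueError on int('-'), excluded by Pre_.
def es_ondulado (cedula : Int) : Bool :=
  let digitos := (PySem.Int.toChars cedula).map (fun c => (PySem.Int.ofChars? [c]).getD 0)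
  if (PySem.Set.ofList digitos).length ≠ 2 then false
  else
    -- for i in range(len(digitos)-2): early return False unless digitos[i] == digitos[i+2]
    (PySem.List.pyRange 0 ((digitos.length : Int) - 2) 1).all
      (fun i => PySem.List.pyGetD digitos i 0 == PySem.List.pyGetD digitos (i + 2) 0)

-- ===== PORT B =====
-- while n > 0: if n % 10 != a: return False; a, b = b, a; n //= 10
def esOndLoop (a b n : Int) : Bool :=
  if 0 < n then
    if PySem.Int.mod n 10 != a then false
    else esOndLoop b a (PySem.Int.floordiv n 10)
  else true
termination_by n.toNat
decreasing_by
  simp only [PySem.Int.floordiv_eq_ediv_of_pos (by omega : (0:Int) < 10)]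
  omega


def es_ondulado_alt (cedula : Int) : Bool :=
  if cedula < 10 then false
  else
    let a := PySem.Int.mod cedula 10
    let b := PySem.Int.mod (PySem.Int.floordiv cedula 10) 10
    if a == b then false
    else esOndLoop a b (PySem.Int.floordiv cedula 100)

-- ===== PRECONDITION & SPEC =====
-- Pre_ excludes cedula < 0: there str(cedula) starts with '-' and int('-') raises ValueError in A.
def Pre_es_ondulado (cedula : Int) : Prop := 0 ≤ cedula
instance (cedula : Int) : Decidable (Pre_es_ondulado cedula) := by unfold Pre_es_ondulado; infer_instance
def pvWitness_es_ondulado : Int := (121)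

def Spec_es_ondulado (cedula : Int) (out : Bool) : Prop := out = es_ondulado_alt cedula
instance (cedula : Int) (out : Bool) : Decidable (Spec_es_ondulado cedula out) := by unfold Spec_es_ondulado; infer_instance

-- ===== CLAIM (what is proved, stated in full; the proofs are below) =====
def Claim_equal_es_ondulado : Prop := ∀ (cedula : Int), Dom_es_ondulado cedula → Pre_es_ondulado cedula → Spec_es_ondulado cedula (es_ondulado cedula)

-- ===== LEMMAS AND PROOFS =====

-- proof-side digit lists: decimal digits most-significant-first (chars / Int values) and
-- least-significant-first (empty for 0), plus the predicates the two ports are reduced to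
def pvCharsOf (m : Nat) : List Char :=
  if h : m < 10 then [Nat.digitChar m]
  else pvCharsOf (m / 10) ++ [Nat.digitChar (m % 10)]
termination_by m
decreasing_by exact Nat.div_lt_self (by omega) (by omega)

def pvDigitsInt (m : Nat) : List Int :=
  if h : m < 10 then [(m : Int)]
  else pvDigitsInt (m / 10) ++ [((m % 10 : Nat) : Int)]
termination_by m
decreasing_by exact Nat.div_lt_self (by omega) (by omega)

def pvLL (m : Nat) : List Int :=
  if h : m = 0 then [] else ((m % 10 : Nat) : Int) :: pvLL (m / 10)
termination_by m
decreasing_by exact Nat.div_lt_self (by omega) (by omega)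

lemma pv_tdc : ∀ f m : Nat, ∀ ds : List Char, m < f →
    Nat.toDigitsCore 10 f m ds = pvCharsOf m ++ ds := by
  intro f
  induction f with
  | zero => intro m ds h; omega
  | succ f ih =>
    intro m ds h
    rw [Nat.toDigitsCore]
    by_cases h10 : m < 10
    · have hd : m / 10 = 0 := Nat.div_eq_of_lt h10
      simp [hd, pvCharsOf, h10, Nat.mod_eq_of_lt h10]
    · have hne : ¬ (m / 10 = 0) := by omega
      rw [if_neg hne, ih (m / 10) _ (by omega)]
      conv_rhs => rw [pvCharsOf]
      rw [dif_neg h10]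
      simp

lemma pv_digit_conv (m : Nat) (hm : m < 10) :
    (PySem.Int.ofChars? [Nat.digitChar m]).getD 0 = (m : Int) := by
  interval_cases m <;> decide

lemma pv_map_charsOf (m : Nat) :
    (pvCharsOf m).map (fun c => (PySem.Int.ofChars? [c]).getD 0) = pvDigitsInt m := by
  induction m using Nat.strong_induction_on with
  | _ m ih =>
    rw [pvCharsOf, pvDigitsInt]
    by_cases h10 : m < 10
    · simp [h10, pv_digit_conv m h10]
    · simp only [h10, dif_neg, not_false_iff, List.map_append, List.map_cons, List.map_nil]
      rw [ih (m / 10) (Nat.div_lt_self (by omega) (by omega))]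
      simp [pv_digit_conv (m % 10) (Nat.mod_lt _ (by omega))]

lemma pv_digitos_eq (c : Int) (hc : 0 ≤ c) :
    (PySem.Int.toChars c).map (fun c => (PySem.Int.ofChars? [c]).getD 0) = pvDigitsInt c.toNat := by
  rw [PySem.Int.toChars, if_neg (by omega), Nat.toDigits, pv_tdc _ _ _ (by omega)]
  simpa using pv_map_charsOf c.toNat

lemma pv_digitsInt_eq_rev (m : Nat) (hm : 1 ≤ m) : pvDigitsInt m = (pvLL m).reverse := by
  induction m using Nat.strong_induction_on with
  | _ m ih =>
    rw [pvDigitsInt, pvLL, dif_neg (show ¬ m = 0 by omega)]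
    by_cases h10 : m < 10
    · have : m / 10 = 0 := Nat.div_eq_of_lt h10
      simp [h10, this, pvLL, Nat.mod_eq_of_lt h10]
    · rw [dif_neg h10, ih (m / 10) (Nat.div_lt_self (by omega) (by omega)) (by omega)]
      simp

def pvChainP (l : List Int) : Prop := ∀ i : Nat, i + 2 < l.length → l.getD i 0 = l.getD (i + 2) 0
def pvAdjP (l : List Int) : Prop := ∀ i : Nat, i + 1 < l.length → l.getD i 0 ≠ l.getD (i + 1) 0
def pvAltP (x y : Int) (l : List Int) : Prop := ∀ i : Nat, i < l.length → l.getD i 0 = if i % 2 = 0 then x else y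

lemma pv_rangeAll_iff (l : List Int) :
    ((PySem.List.pyRange 0 ((l.length : Int) - 2) 1).all
      (fun i => PySem.List.pyGetD l i 0 == PySem.List.pyGetD l (i + 2) 0) = true) ↔ pvChainP l := by
  rw [List.all_eq_true]
  have hcast : ∀ i : Nat, PySem.List.pyGetD l ((i : Int) + 2) 0 = l.getD (i + 2) 0 := by
    intro i
    have h : ((i : Int) + 2) = (((i + 2 : Nat)) : Int) := by push_cast; ring
    rw [h, PySem.List.pyGetD_natCast]
  constructor
  · intro h i hi
    have hm : (i : Int) ∈ PySem.List.pyRange 0 ((l.length : Int) - 2) 1 := by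
      rw [PySem.List.mem_pyRange_one]
      omega
    have := h _ hm
    simp only [beq_iff_eq] at this
    rwa [PySem.List.pyGetD_natCast, hcast] at this
  · intro h i hm
    rw [PySem.List.mem_pyRange_one] at hm
    obtain ⟨h0, h1⟩ := hm
    lift i to ℕ using h0 with k
    simp only [beq_iff_eq]
    rw [PySem.List.pyGetD_natCast, hcast]
    exact h k (by omega)

lemma pv_nodup_const_len_le_one (l : List Int) (c : Int) (hn : l.Nodup)
    (h : ∀ a ∈ l, a = c) : l.length ≤ 1 := by
  match l with
  | [] => simp
  | [a] => simp
  | a :: b :: t =>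
    exfalso
    have ha := h a (by simp)
    have hb := h b (by simp)
    have := (List.nodup_cons.mp hn).1
    exact this (by simp [ha, hb])

lemma pv_ofList_len_le_one (l : List Int) (c : Int) (h : ∀ a ∈ l, a = c) :
    (PySem.Set.ofList l).length ≤ 1 :=
  pv_nodup_const_len_le_one _ c (PySem.Set.nodup_ofList l)
    (fun a ha => h a ((PySem.Set.mem_ofList l a).mp ha))

lemma pv_ofList_len_two (l : List Int) (x y : Int) (hxy : x ≠ y) (hx : x ∈ l) (hy : y ∈ l)
    (h : ∀ a ∈ l, a = x ∨ a = y) : (PySem.Set.ofList l).length = 2 := by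
  have hnd : (PySem.Set.ofList l).Nodup := PySem.Set.nodup_ofList l
  have hfin : (PySem.Set.ofList l).toFinset = ({x, y} : Finset Int) := by
    ext a
    simp only [List.mem_toFinset, Finset.mem_insert, Finset.mem_singleton]
    rw [PySem.Set.mem_ofList]
    constructor
    · exact h a
    · rintro (rfl | rfl) <;> assumption
  have := List.toFinset_card_of_nodup hnd
  rw [hfin] at this
  rw [← this]
  exact Finset.card_pair hxy

lemma pv_chain_to_alt (l : List Int) (hl : 2 ≤ l.length) (hc : pvChainP l) :
    pvAltP (l.getD 0 0) (l.getD 1 0) l := by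
  intro i
  induction i using Nat.strong_induction_on with
  | _ i ih =>
    intro hi
    match i with
    | 0 => simp
    | 1 => simp
    | (k+2) =>
      have h1 := hc k hi
      have h2 := ih k (by omega) (by omega)
      rw [← h1, h2]
      have : (k + 2) % 2 = k % 2 := by omega
      rw [this]

lemma pv_alt_to_chain (x y : Int) (l : List Int) (h : pvAltP x y l) : pvChainP l := by
  intro i hi
  rw [h i (by omega), h (i+2) (by omega)]
  have : (i + 2) % 2 = i % 2 := by omega
  rw [this]

lemma pv_alt_adj (x y : Int) (l : List Int) (hxy : x ≠ y) (h : pvAltP x y l) : pvAdjP l := by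
  intro i hi
  rw [h i (by omega), h (i+1) (by omega)]
  by_cases hp : i % 2 = 0
  · have : (i + 1) % 2 = 1 := by omega
    simp [hp, this, hxy]
  · have : (i + 1) % 2 = 0 := by omega
    simp [hp, this, Ne.symm hxy]

lemma pv_C_iff (l : List Int) :
    ((PySem.Set.ofList l).length = 2 ∧ pvChainP l) ↔ (2 ≤ l.length ∧ pvChainP l ∧ pvAdjP l) := by
  constructor
  · rintro ⟨hg, hc⟩
    have hlen : 2 ≤ l.length := by
      have := PySem.Set.length_ofList_le (xs := l)
      omega
    have halt := pv_chain_to_alt l hlen hc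
    have hne : l.getD 0 0 ≠ l.getD 1 0 := by
      intro heq
      have : (PySem.Set.ofList l).length ≤ 1 := by
        apply pv_ofList_len_le_one l (l.getD 0 0)
        intro a ha
        obtain ⟨i, hi, rfl⟩ := List.mem_iff_getElem.mp ha
        rw [← List.getD_eq_getElem l 0 hi, halt i hi]
        by_cases hp : i % 2 = 0
        · rw [if_pos hp]
        · rw [if_neg hp]; exact heq.symm
      omega
    exact ⟨hlen, hc, pv_alt_adj _ _ _ hne halt⟩
  · rintro ⟨hlen, hc, ha⟩
    refine ⟨?_, hc⟩
    have halt := pv_chain_to_alt l hlen hc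
    have hne : l.getD 0 0 ≠ l.getD 1 0 := ha 0 (by omega)
    apply pv_ofList_len_two l _ _ hne
    · rw [List.getD_eq_getElem l 0 (by omega)]; exact List.getElem_mem _
    · rw [List.getD_eq_getElem l 0 (by omega)]; exact List.getElem_mem _
    · intro a hmem
      obtain ⟨i, hi, rfl⟩ := List.mem_iff_getElem.mp hmem
      rw [← List.getD_eq_getElem l 0 hi, halt i hi]
      by_cases hp : i % 2 = 0
      · rw [if_pos hp]; exact Or.inl rfl
      · rw [if_neg hp]; exact Or.inr rfl

lemma pv_getD_rev (l : List Int) (i : Nat) (h : i < l.length) :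
    l.reverse.getD i 0 = l.getD (l.length - 1 - i) 0 := by
  rw [List.getD_eq_getElem _ _ (by simpa using h), List.getElem_reverse,
      List.getD_eq_getElem _ _ (by omega)]

lemma pv_chain_rev_of (l : List Int) (h : pvChainP l) : pvChainP l.reverse := by
  intro i hi
  rw [List.length_reverse] at hi
  rw [pv_getD_rev l i (by omega), pv_getD_rev l (i+2) (by omega)]
  have e1 : l.length - 1 - i = (l.length - 1 - (i + 2)) + 2 := by omega
  rw [e1]
  exact (h _ (by omega)).symm

lemma pv_chain_rev (l : List Int) : pvChainP l.reverse ↔ pvChainP l :=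
  ⟨fun h => by simpa using pv_chain_rev_of l.reverse h, pv_chain_rev_of l⟩

lemma pv_adj_rev_of (l : List Int) (h : pvAdjP l) : pvAdjP l.reverse := by
  intro i hi
  rw [List.length_reverse] at hi
  rw [pv_getD_rev l i (by omega), pv_getD_rev l (i+1) (by omega)]
  have e1 : l.length - 1 - i = (l.length - 1 - (i + 1)) + 1 := by omega
  rw [e1]
  exact (h _ (by omega)).symm

lemma pv_adj_rev (l : List Int) : pvAdjP l.reverse ↔ pvAdjP l :=
  ⟨fun h => by simpa using pv_adj_rev_of l.reverse h, pv_adj_rev_of l⟩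

def pvPatB (a b : Int) : List Int → Bool
  | [] => true
  | c :: t => if c != a then false else pvPatB b a t

lemma pv_alt_cons (a b c : Int) (t : List Int) :
    pvAltP a b (c :: t) ↔ c = a ∧ pvAltP b a t := by
  constructor
  · intro h
    refine ⟨by simpa using h 0 (by simp), ?_⟩
    intro i hi
    have := h (i + 1) (by simp; omega)
    rw [List.getD_cons_succ] at this
    by_cases hp : i % 2 = 0
    · have h2 : (i + 1) % 2 = 1 := by omega
      rw [h2] at this; simp at this; simpa [hp] using this
    · have h2 : (i + 1) % 2 = 0 := by omega
      rw [h2] at this; simp at this; simpa [hp] using this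
  · rintro ⟨rfl, ht⟩
    intro i hi
    match i with
    | 0 => simp
    | (k+1) =>
      rw [List.getD_cons_succ]
      have := ht k (by simp at hi; omega)
      by_cases hp : k % 2 = 0
      · have h2 : (k + 1) % 2 = 1 := by omega
        rw [h2]; simpa [hp] using this
      · have h2 : (k + 1) % 2 = 0 := by omega
        rw [h2]; simpa [hp] using this

lemma pv_patB_iff (l : List Int) : ∀ a b : Int, (pvPatB a b l = true ↔ pvAltP a b l) := by
  induction l with
  | nil => intro a b; simp [pvPatB]; intro i hi; simp at hi
  | cons c t ih =>
    intro a b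
    rw [pv_alt_cons]
    by_cases hc : c = a
    · simp [pvPatB, hc, ih b a]
    · simp [pvPatB, hc]

lemma pv_loop_eq (m : Nat) : ∀ a b : Int, esOndLoop a b (m : Int) = pvPatB a b (pvLL m) := by
  induction m using Nat.strong_induction_on with
  | _ m ih =>
    intro a b
    by_cases h0 : m = 0
    · subst h0
      rw [esOndLoop, pvLL]
      simp [pvPatB]
    · rw [esOndLoop, if_pos (by omega : (0:Int) < (m:Int))]
      rw [pvLL, dif_neg h0]
      have hm : PySem.Int.mod (m:Int) 10 = ((m % 10 : Nat) : Int) := by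
        exact_mod_cast PySem.Int.mod_natCast m 10
      have hf : PySem.Int.floordiv (m:Int) 10 = ((m / 10 : Nat) : Int) := by
        exact_mod_cast PySem.Int.floordiv_natCast m 10
      rw [hm, hf, ih (m / 10) (Nat.div_lt_self (by omega) (by omega))]
      simp [pvPatB]

lemma pv_A_iff (n : Nat) : es_ondulado (n : Int) = true ↔
    ((PySem.Set.ofList (pvDigitsInt n)).length = 2 ∧ pvChainP (pvDigitsInt n)) := by
  have hd := pv_digitos_eq (n : Int) (by omega)
  rw [Int.toNat_natCast] at hd
  unfold es_ondulado
  simp only [hd]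
  by_cases hg : (PySem.Set.ofList (pvDigitsInt n)).length ≠ 2
  · simp only [if_pos hg]
    constructor
    · intro h; exact absurd h (by simp)
    · rintro ⟨h2, _⟩; exact absurd h2 hg
  · rw [if_neg hg, pv_rangeAll_iff]
    rw [not_ne_iff] at hg
    exact ⟨fun h => ⟨hg, h⟩, fun h => h.2⟩

lemma pv_B_iff (n : Nat) (hn : 10 ≤ n) : es_ondulado_alt (n : Int) = true ↔
    (((n % 10 : Nat) : Int) ≠ ((n / 10 % 10 : Nat) : Int) ∧
      pvAltP ((n % 10 : Nat) : Int) ((n / 10 % 10 : Nat) : Int) (pvLL (n / 100))) := by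
  unfold es_ondulado_alt
  rw [if_neg (by omega : ¬ ((n : Int) < 10))]
  have hm : PySem.Int.mod (n:Int) 10 = ((n % 10 : Nat) : Int) := by
    exact_mod_cast PySem.Int.mod_natCast n 10
  have hf : PySem.Int.floordiv (n:Int) 10 = ((n / 10 : Nat) : Int) := by
    exact_mod_cast PySem.Int.floordiv_natCast n 10
  have hm2 : PySem.Int.mod ((n / 10 : Nat) : Int) 10 = ((n / 10 % 10 : Nat) : Int) := by
    exact_mod_cast PySem.Int.mod_natCast (n / 10) 10
  have hf2 : PySem.Int.floordiv (n:Int) 100 = ((n / 100 : Nat) : Int) := by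
    exact_mod_cast PySem.Int.floordiv_natCast n 100
  simp only [hm, hf, hm2, hf2]
  by_cases hab : ((n % 10 : Nat) : Int) = ((n / 10 % 10 : Nat) : Int)
  · rw [if_pos (by simpa using hab)]
    constructor
    · intro h; exact absurd h (by simp)
    · rintro ⟨hne, _⟩; exact absurd hab hne
  · rw [if_neg (by simpa using hab), pv_loop_eq, pv_patB_iff]
    exact ⟨fun h => ⟨hab, h⟩, fun h => h.2⟩

lemma pv_cons2_iff (a b : Int) (rest : List Int) :
    (pvChainP (a :: b :: rest) ∧ pvAdjP (a :: b :: rest)) ↔ (a ≠ b ∧ pvAltP a b rest) := by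
  constructor
  · rintro ⟨hc, ha⟩
    have halt := pv_chain_to_alt (a :: b :: rest) (by simp) hc
    simp only [List.getD_cons_zero, List.getD_cons_succ] at halt
    have hne : a ≠ b := by
      have := ha 0 (by simp)
      simpa using this
    have h1 := (pv_alt_cons a b a (b :: rest)).mp halt
    have h2 := (pv_alt_cons b a b rest).mp h1.2
    exact ⟨hne, h2.2⟩
  · rintro ⟨hne, halt⟩
    have hAll : pvAltP a b (a :: b :: rest) :=
      (pv_alt_cons a b a (b :: rest)).mpr ⟨rfl, (pv_alt_cons b a b rest).mpr ⟨rfl, halt⟩⟩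
    exact ⟨pv_alt_to_chain _ _ _ hAll, pv_alt_adj _ _ _ hne hAll⟩

theorem pv_main_nat (n : Nat) : es_ondulado (n : Int) = es_ondulado_alt (n : Int) := by
  by_cases hn : n < 10
  · have hA : es_ondulado (n : Int) = false := by
      have hd := pv_digitos_eq (n : Int) (by omega)
      rw [Int.toNat_natCast] at hd
      unfold es_ondulado
      simp only [hd]
      rw [pvDigitsInt, dif_pos hn]
      have h1 : (PySem.Set.ofList [((n : Nat) : Int)]).length ≤ 1 :=
        pv_ofList_len_le_one _ ((n : Nat) : Int) (by intro a ha; simpa using ha)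
      rw [if_pos (by omega)]
    have hB : es_ondulado_alt (n : Int) = false := by
      unfold es_ondulado_alt
      rw [if_pos (by omega : ((n : Int) < 10))]
    rw [hA, hB]
  · rw [Nat.not_lt] at hn
    have hL : pvLL n = ((n % 10 : Nat) : Int) :: ((n / 10 % 10 : Nat) : Int) :: pvLL (n / 100) := by
      rw [pvLL, dif_neg (by omega : ¬ n = 0), pvLL, dif_neg (by omega : ¬ n / 10 = 0),
          Nat.div_div_eq_div_mul]
    have hbridge : ((PySem.Set.ofList (pvDigitsInt n)).length = 2 ∧ pvChainP (pvDigitsInt n)) ↔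
        (((n % 10 : Nat) : Int) ≠ ((n / 10 % 10 : Nat) : Int) ∧
          pvAltP ((n % 10 : Nat) : Int) ((n / 10 % 10 : Nat) : Int) (pvLL (n / 100))) := by
      rw [pv_digitsInt_eq_rev n (by omega), pv_C_iff, List.length_reverse, pv_chain_rev, pv_adj_rev, hL]
      constructor
      · rintro ⟨_, hc, ha⟩
        exact (pv_cons2_iff _ _ _).mp ⟨hc, ha⟩
      · intro h
        have h2 := (pv_cons2_iff _ _ _).mpr h
        exact ⟨by simp, h2.1, h2.2⟩
    by_cases hp : ((PySem.Set.ofList (pvDigitsInt n)).length = 2 ∧ pvChainP (pvDigitsInt n))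
    · rw [(pv_A_iff n).mpr hp, (pv_B_iff n hn).mpr (hbridge.mp hp)]
    · have hA : es_ondulado (n : Int) = false := by
        cases h : es_ondulado (n : Int)
        · rfl
        · exact absurd ((pv_A_iff n).mp h) hp
      have hB : es_ondulado_alt (n : Int) = false := by
        cases h : es_ondulado_alt (n : Int)
        · rfl
        · exact absurd (hbridge.mpr ((pv_B_iff n hn).mp h)) hp
      rw [hA, hB]

-- ===== VERDICT (by name: the statement is the Claim_ definition above) =====
theorem es_ondulado_spec : Claim_equal_es_ondulado := by
  intro cedula hdom hpre
  unfold Pre_es_ondulado at hpre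
  unfold Spec_es_ondulado
  have h : cedula = ((cedula.toNat : Nat) : Int) := (Int.toNat_of_nonneg hpre).symm
  rw [h]
  exact pv_main_nat cedula.toNat
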